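-- pv_equiv track=rewrite | github.com/chadexplains/leetcode | 1073/solution.py | addNegabinary
-- ===== SOURCE A (Python) =====
-- from typing import List
--
-- def addNegabinary(arr1: List[int], arr2: List[int]) -> List[int]:
--     num1 = sum([(-2)**i * x for i, x in enumerate(arr1[::-1])])
--     num2 = sum([(-2)**i * x for i, x in enumerate(arr2[::-1])])
--     res = num1 + num2
--     if res == 0:
--         return [0]
--     ans = []
--     while res != 0:
--         res, rem = divmod(res, -2)
--         if rem < 0:
--             res, rem = res + 1, rem + 2
--         ans.append(rem)
--     return ans[::-1]
-- ===== SOURCE B (Python) =====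
-- from typing import List
--
-- def addNegabinary(arr1: List[int], arr2: List[int]) -> List[int]:
--     ds1, ds2 = list(arr1), list(arr2)   # consumed from the end: least-significant digit first
--     digits = []                         # little-endian result digits
--     carry = 0
--     while ds1 or ds2 or carry:
--         t = carry + (ds1.pop() if ds1 else 0) + (ds2.pop() if ds2 else 0)
--         digits.append(t % 2)
--         carry = -(t // 2)
--     while digits and digits[-1] == 0:
--         digits.pop()
--     digits.reverse()
--     return digits if digits else [0]
-- ===== Notes on version B (the rewrite author's own statement) =====
-- stated objective: faster
-- what changed: A decodes both arrays into one big integer (computing (-2)**i for every position) and re-encodes it by repeated divmod; B does a single digit-wise addition pass in base -2 with a carry, then strips trailing zeros.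
import Mathlib
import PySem

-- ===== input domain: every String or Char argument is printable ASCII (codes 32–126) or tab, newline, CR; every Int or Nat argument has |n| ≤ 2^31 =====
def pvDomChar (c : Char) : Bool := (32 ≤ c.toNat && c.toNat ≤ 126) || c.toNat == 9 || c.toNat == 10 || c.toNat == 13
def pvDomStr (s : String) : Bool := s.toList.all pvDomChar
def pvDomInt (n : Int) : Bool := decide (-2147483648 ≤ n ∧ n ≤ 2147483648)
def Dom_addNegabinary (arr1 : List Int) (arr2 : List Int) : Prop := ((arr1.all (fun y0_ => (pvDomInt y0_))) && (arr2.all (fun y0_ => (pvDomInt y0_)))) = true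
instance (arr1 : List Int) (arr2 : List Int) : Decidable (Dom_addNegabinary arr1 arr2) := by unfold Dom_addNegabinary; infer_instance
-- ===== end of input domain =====

-- B replaces A's convert-to-one-big-integer-and-re-encode pass by a single digit-wise
-- carry pass in base -2; objective: faster.

-- ===== PORT A =====
-- A's while loop: res,rem = divmod(res,-2); if rem<0: res,rem = res+1,rem+2; ans.append(rem).
-- Returned in append (little-endian) order; A reverses it at the end.
def negLoop (res : Int) : List Int :=
  if h : res = 0 then []
  else if PySem.Int.mod res (-2) < 0 then
    (PySem.Int.mod res (-2) + 2) :: negLoop (PySem.Int.floordiv res (-2) + 1)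
  else
    PySem.Int.mod res (-2) :: negLoop (PySem.Int.floordiv res (-2))
termination_by 2 * res.natAbs + (if res < 0 then 1 else 0)
decreasing_by
  · have hm := PySem.Int.floordiv_mul_add_mod res (-2)
    have hb := PySem.Int.mod_neg_bounds (a := res) (b := -2) (by norm_num)
    split_ifs <;> omega
  · have hm := PySem.Int.floordiv_mul_add_mod res (-2)
    have hb := PySem.Int.mod_neg_bounds (a := res) (b := -2) (by norm_num)
    split_ifs <;> omega

-- arr[::-1] is ported as List.reverse (exact); sum over enumerate as a mapped sum.
def addNegabinary (arr1 : List Int) (arr2 : List Int) : List Int :=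
  let num1 := ((PySem.List.enumerate arr1.reverse).map (fun p => (-2:Int)^p.1.toNat * p.2)).sum
  let num2 := ((PySem.List.enumerate arr2.reverse).map (fun p => (-2:Int)^p.1.toNat * p.2)).sum
  let res := num1 + num2
  if res = 0 then [0]
  else (negLoop res).reverse

-- ===== PORT B =====
-- B's while loop: pop the last element of each remaining array (= consume the reversed arrays
-- front-to-back), t = carry + d1 + d2, emit t % 2, carry = -(t // 2); runs until both arrays
-- and the carry are exhausted.
def addLE : List Int → List Int → Int → List Int
  | [], [], c =>
    if h : c = 0 then []
    else PySem.Int.mod c 2 :: addLE [] [] (-(PySem.Int.floordiv c 2))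
  | a :: xs, [], c =>
    PySem.Int.mod (c + a) 2 :: addLE xs [] (-(PySem.Int.floordiv (c + a) 2))
  | [], b :: ys, c =>
    PySem.Int.mod (c + b) 2 :: addLE [] ys (-(PySem.Int.floordiv (c + b) 2))
  | a :: xs, b :: ys, c =>
    PySem.Int.mod (c + a + b) 2 :: addLE xs ys (-(PySem.Int.floordiv (c + a + b) 2))
termination_by xs ys c => (xs.length + ys.length, 2 * c.natAbs + (if c < 0 then 1 else 0))
decreasing_by
  · apply Prod.Lex.right
    rw [PySem.Int.floordiv_eq_ediv_of_pos (by norm_num : (0:Int) < 2)]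
    split_ifs <;> omega
  · apply Prod.Lex.left; simp
  · apply Prod.Lex.left; simp
  · apply Prod.Lex.left; simp; omega

-- 'while digits and digits[-1] == 0: digits.pop()' = drop the leading block of zeros of the
-- reversed list; then 'digits.reverse()' and the empty-result check.
def addNegabinary_alt (arr1 : List Int) (arr2 : List Int) : List Int :=
  let digits := addLE arr1.reverse arr2.reverse 0
  let stripped := (digits.reverse.dropWhile (fun d => d == 0)).reverse
  let out := stripped.reverse
  if out = [] then [0] else out

-- ===== PRECONDITION & SPEC =====
def Spec_addNegabinary (arr1 : List Int) (arr2 : List Int) (out : List Int) : Prop := out = addNegabinary_alt arr1 arr2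
instance (arr1 : List Int) (arr2 : List Int) (out : List Int) : Decidable (Spec_addNegabinary arr1 arr2 out) := by unfold Spec_addNegabinary; infer_instance

-- ===== CLAIM (what is proved, stated in full; the proofs are below) =====
def Claim_equal_addNegabinary : Prop := ∀ (arr1 : List Int) (arr2 : List Int), Dom_addNegabinary arr1 arr2 → Spec_addNegabinary arr1 arr2 (addNegabinary arr1 arr2)

-- ===== LEMMAS AND PROOFS =====

-- value of a little-endian digit list in base -2
def nval : List Int → Int
  | [] => 0
  | d :: ds => d + (-2) * nval ds

def digits01 (ds : List Int) : Prop := ∀ d ∈ ds, d = 0 ∨ d = 1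

lemma enum_sum (xs : List Int) : ∀ k : Int, 0 ≤ k →
    ((PySem.List.enumerate xs k).map (fun p => (-2:Int)^p.1.toNat * p.2)).sum = (-2)^k.toNat * nval xs := by
  induction xs with
  | nil => intro k hk; simp [PySem.List.enumerate, nval]
  | cons x xs ih =>
    intro k hk
    rw [PySem.List.enumerate_cons]
    have h1 : (k + 1).toNat = k.toNat + 1 := by omega
    simp only [List.map_cons, List.sum_cons, ih (k+1) (by omega), h1, nval]
    ring

lemma negLoop_val (res : Int) : nval (negLoop res) = res := by
  fun_induction negLoop with
  | case1 => simp_all [nval]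
  | case2 res h hlt ih =>
    have hm := PySem.Int.floordiv_mul_add_mod res (-2)
    simp only [nval, ih]; omega
  | case3 res h hlt ih =>
    have hm := PySem.Int.floordiv_mul_add_mod res (-2)
    simp only [nval, ih]; omega

lemma negLoop_01 (res : Int) : digits01 (negLoop res) := by
  fun_induction negLoop with
  | case1 => simp [digits01]
  | case2 res h hlt ih =>
    have hb := PySem.Int.mod_neg_bounds (a := res) (b := -2) (by norm_num)
    intro d hd
    rw [List.mem_cons] at hd
    rcases hd with rfl | hd
    · omega
    · exact ih d hd
  | case3 res h hlt ih =>
    have hb := PySem.Int.mod_neg_bounds (a := res) (b := -2) (by norm_num)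
    intro d hd
    rw [List.mem_cons] at hd
    rcases hd with rfl | hd
    · omega
    · exact ih d hd

lemma negLoop_nil_iff (res : Int) : negLoop res = [] ↔ res = 0 := by
  constructor
  · intro h
    have := negLoop_val res
    rw [h] at this
    simpa [nval] using this.symm
  · intro h; simp [negLoop, h]

lemma negLoop_last (res : Int) : (negLoop res).getLast? ≠ some 0 := by
  fun_induction negLoop with
  | case1 => simp
  | case2 res h hlt ih =>
    have hm := PySem.Int.floordiv_mul_add_mod res (-2)
    have hb := PySem.Int.mod_neg_bounds (a := res) (b := -2) (by norm_num)
    rcases heq : negLoop (PySem.Int.floordiv res (-2) + 1) with _ | ⟨a, t⟩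
    · have h0 : PySem.Int.floordiv res (-2) + 1 = 0 := (negLoop_nil_iff _).mp heq
      simp only [List.getLast?_singleton, ne_eq, Option.some.injEq]
      omega
    · rw [heq] at ih
      simpa [List.getLast?_cons_cons] using ih
  | case3 res h hlt ih =>
    have hm := PySem.Int.floordiv_mul_add_mod res (-2)
    have hb := PySem.Int.mod_neg_bounds (a := res) (b := -2) (by norm_num)
    rcases heq : negLoop (PySem.Int.floordiv res (-2)) with _ | ⟨a, t⟩
    · have h0 : PySem.Int.floordiv res (-2) = 0 := (negLoop_nil_iff _).mp heq
      simp only [List.getLast?_singleton, ne_eq, Option.some.injEq]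
      omega
    · rw [heq] at ih
      simpa [List.getLast?_cons_cons] using ih

lemma addLE_val (xs ys : List Int) (c : Int) : nval (addLE xs ys c) = nval xs + nval ys + c := by
  fun_induction addLE with
  | case1 => simp_all [nval]
  | case2 c h ih =>
    have hm := PySem.Int.floordiv_mul_add_mod c 2
    simp only [nval, ih]; omega
  | case3 a xs c ih =>
    have hm := PySem.Int.floordiv_mul_add_mod (c + a) 2
    simp only [nval, ih]; omega
  | case4 b ys c ih =>
    have hm := PySem.Int.floordiv_mul_add_mod (c + b) 2
    simp only [nval, ih]; omega
  | case5 a xs b ys c ih =>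
    have hm := PySem.Int.floordiv_mul_add_mod (c + a + b) 2
    simp only [nval, ih]; omega

lemma mod_two_01 (t : Int) : PySem.Int.mod t 2 = 0 ∨ PySem.Int.mod t 2 = 1 := by
  have h0 := PySem.Int.mod_nonneg (a := t) (b := 2) (by norm_num)
  have h1 := PySem.Int.mod_lt (a := t) (b := 2) (by norm_num)
  omega

lemma addLE_01 (xs ys : List Int) (c : Int) : digits01 (addLE xs ys c) := by
  fun_induction addLE with
  | case1 => simp [digits01]
  | case2 c h ih =>
    intro d hd
    rw [List.mem_cons] at hd
    rcases hd with rfl | hd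
    · exact mod_two_01 c
    · exact ih d hd
  | case3 a xs c ih =>
    intro d hd
    rw [List.mem_cons] at hd
    rcases hd with rfl | hd
    · exact mod_two_01 _
    · exact ih d hd
  | case4 b ys c ih =>
    intro d hd
    rw [List.mem_cons] at hd
    rcases hd with rfl | hd
    · exact mod_two_01 _
    · exact ih d hd
  | case5 a xs b ys c ih =>
    intro d hd
    rw [List.mem_cons] at hd
    rcases hd with rfl | hd
    · exact mod_two_01 _
    · exact ih d hd

lemma nval_append_single (l : List Int) (x : Int) : nval (l ++ [x]) = nval l + (-2)^l.length * x := by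
  induction l with
  | nil => simp [nval]
  | cons d t ih => simp [nval, ih, pow_succ]; ring

lemma nval_dropWhile_rev (r : List Int) :
    nval (List.dropWhile (fun d => d == 0) r).reverse = nval r.reverse := by
  induction r with
  | nil => simp
  | cons x r ih =>
    by_cases hx : x = 0
    · subst hx
      simp only [List.dropWhile_cons, beq_self_eq_true, if_true, ih,
        List.reverse_cons, nval_append_single]
      ring
    · simp [hx]

lemma head_dropWhile_ne_zero (r : List Int) :
    ∀ x, (List.dropWhile (fun d => d == 0) r).head? = some x → x ≠ 0 := by
  induction r with
  | nil => simp
  | cons a r ih =>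
    intro x hx
    by_cases ha : a = 0
    · subst ha; rw [List.dropWhile_cons] at hx; simp at hx; exact ih x hx
    · rw [List.dropWhile_cons] at hx
      simp [ha] at hx
      omega

lemma nval_zero_nil : ∀ ds : List Int, digits01 ds → ds.getLast? ≠ some 0 → nval ds = 0 → ds = [] := by
  intro ds
  induction ds with
  | nil => intro _ _ _; rfl
  | cons d t ih =>
    intro h01 hlast hval
    have hd : d = 0 ∨ d = 1 := h01 d (by simp)
    have hstep : nval (d :: t) = d + (-2) * nval t := rfl
    have hd0 : d = 0 ∧ nval t = 0 := by omega
    rcases t with _ | ⟨a, t'⟩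
    · exfalso; apply hlast; simp [hd0.1]
    · have ht : a :: t' = [] := by
        apply ih
        · intro x hx; exact h01 x (by simp [hx])
        · simpa [List.getLast?_cons_cons] using hlast
        · exact hd0.2
      exact absurd ht (by simp)

lemma nval_uniq : ∀ ds1 : List Int, digits01 ds1 → ds1.getLast? ≠ some 0 →
    ∀ ds2 : List Int, digits01 ds2 → ds2.getLast? ≠ some 0 → nval ds1 = nval ds2 → ds1 = ds2 := by
  intro ds1
  induction ds1 with
  | nil =>
    intro _ _ ds2 h01 hlast hval
    exact (nval_zero_nil ds2 h01 hlast (by simpa [nval] using hval.symm)).symm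
  | cons d t ih =>
    intro h01 hlast ds2 h012 hlast2 hval
    rcases ds2 with _ | ⟨e, s⟩
    · exact absurd (nval_zero_nil (d :: t) h01 hlast (by simpa [nval] using hval)) (by simp)
    · have hd : d = 0 ∨ d = 1 := h01 d (by simp)
      have he : e = 0 ∨ e = 1 := h012 e (by simp)
      have h1 : nval (d :: t) = d + (-2) * nval t := rfl
      have h2 : nval (e :: s) = e + (-2) * nval s := rfl
      have hde : d = e ∧ nval t = nval s := by omega
      have htail : t = s := by
        apply ih
        · intro x hx; exact h01 x (by simp [hx])
        · rcases t with _ | ⟨a, t'⟩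
          · simp
          · simpa [List.getLast?_cons_cons] using hlast
        · intro x hx; exact h012 x (by simp [hx])
        · rcases s with _ | ⟨b, s'⟩
          · simp
          · simpa [List.getLast?_cons_cons] using hlast2
        · exact hde.2
      rw [hde.1, htail]

-- ===== VERDICT (by name: the statement is the Claim_ definition above) =====
theorem addNegabinary_spec : Claim_equal_addNegabinary := by
  intro arr1 arr2 _
  unfold Spec_addNegabinary addNegabinary addNegabinary_alt
  have e1 := enum_sum arr1.reverse 0 (by norm_num)
  have e2 := enum_sum arr2.reverse 0 (by norm_num)
  simp only [Int.toNat_zero, pow_zero, one_mul] at e1 e2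
  simp only [e1, e2, List.reverse_reverse]
  set D := addLE arr1.reverse arr2.reverse 0 with hD
  set s := List.dropWhile (fun d => d == 0) D.reverse with hs
  have hval_s : nval s.reverse = nval arr1.reverse + nval arr2.reverse := by
    rw [hs, nval_dropWhile_rev, List.reverse_reverse, hD, addLE_val]
    ring
  have h01s : digits01 s.reverse := by
    intro x hx
    rw [List.mem_reverse] at hx
    have hsub := (List.dropWhile_sublist (p := fun d => (d == 0)) (l := D.reverse)).subset
    have hxD : x ∈ D.reverse := hsub (hs ▸ hx)
    rw [List.mem_reverse, hD] at hxD
    exact addLE_01 arr1.reverse arr2.reverse 0 x hxD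
  have hlast_s : s.reverse.getLast? ≠ some 0 := by
    rw [List.getLast?_reverse]
    intro hc
    exact head_dropWhile_ne_zero D.reverse 0 (hs ▸ hc) rfl
  by_cases h0 : nval arr1.reverse + nval arr2.reverse = 0
  · have hnil : s.reverse = [] := nval_zero_nil s.reverse h01s hlast_s (by rw [hval_s, h0])
    rw [List.reverse_eq_nil_iff] at hnil
    rw [if_pos h0, if_pos hnil]
  · have heq : negLoop (nval arr1.reverse + nval arr2.reverse) = s.reverse :=
      nval_uniq _ (negLoop_01 _) (negLoop_last _) s.reverse h01s hlast_s
        (by rw [negLoop_val, hval_s])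
    have hsne : s ≠ [] := by
      intro hc
      rw [hc] at heq
      simp only [List.reverse_nil] at heq
      exact h0 ((negLoop_nil_iff _).mp heq)
    rw [if_neg h0, if_neg hsne, heq, List.reverse_reverse]
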